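-- pv_equiv track=rewrite | github.com/zvrkhn/translate-project | version0.py | makeParagraphs
-- ===== SOURCE A (Python) =====
-- def makeParagraphsCoordinates(coordinates_a, coordinates_b): # make new vertical coordinates for the text boxes
--   """
--   Connect two text boxes into one paragraph box that contains both of them (vertical box connection)
--
--   """
--
--   new_coordinates = [
--     [min(coordinates_a[0][0], coordinates_b[0][0]), coordinates_a[0][1]],
--     [max(coordinates_a[1][0], coordinates_b[1][0]), coordinates_a[1][1]],
--     [max(coordinates_a[2][0], coordinates_b[2][0]), coordinates_b[2][1]],
--     [min(coordinates_a[3][0], coordinates_b[3][0]), coordinates_b[3][1]]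
--   ]
--   return new_coordinates
--
-- def makeParagraphs(result): # compares the coordinates of the text boxes and if they are close enough, it combines them into one paragraph
--   """
--   THE MAIN IDEA:
--   if difference between TOP LEFT y of the bottom box and BOTTOM RIGHT y of the top box is less than 5
--   then combine them into one paragraph
--
--   """
--
--   lines = [result[0][1]]
--   coordinates = [result[0][0]]
--   for i in range(1, len(result)):
--
--     diff_y = result[i][0][0][1] - coordinates[-1][2][1]
--     if diff_y < 5:
--       lines[-1] += " " + result[i][1]
--       coordinates[-1] = makeParagraphsCoordinates(coordinates[-1], result[i][0])
--
--     else: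
--       lines.append(result[i][1])
--       coordinates.append(result[i][0])
--
--   return list(zip(coordinates, lines))
-- ===== SOURCE B (Python) =====
-- def _mergeBoxes(a, b):
--     # paragraph box containing both quadrilateral boxes (vertical connection)
--     return [
--         [min(a[0][0], b[0][0]), a[0][1]],
--         [max(a[1][0], b[1][0]), a[1][1]],
--         [max(a[2][0], b[2][0]), b[2][1]],
--         [min(a[3][0], b[3][0]), b[3][1]],
--     ]
--
-- def _splitRun(prev, rest):
--     # peel the maximal run of boxes each within 5px below the previous one
--     run = []
--     while rest and rest[0][0][0][1] - prev[0][2][1] < 5: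
--         prev = rest[0]
--         run.append(prev)
--         rest = rest[1:]
--     return run, rest
--
-- def makeParagraphs(result):
--     out = []
--     boxes = result
--     while boxes:
--         first = boxes[0]
--         run, boxes = _splitRun(first, boxes[1:])
--         coords, text = first[0], first[1]
--         for box_coords, box_text in run:
--             coords = _mergeBoxes(coords, box_coords)
--             text += " " + box_text
--         out.append((coords, text))
--     return out
-- ===== Notes on version B (the rewrite author's own statement) =====
-- stated objective: alternative
-- what changed: A is one online fold that keeps rewriting the last element of two parallel lists (coordinates[-1], lines[-1]); B instead peels maximal runs of vertically-close boxes off the front and folds each run once into a (coords, text) paragraph, appending finished paragraphs only.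
-- crash fix: On the empty list A raises IndexError (it indexes result[0]); B naturally returns the empty paragraph list. — e.g. on makeParagraphs([]): A raises IndexError, B returns []
import Mathlib
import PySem

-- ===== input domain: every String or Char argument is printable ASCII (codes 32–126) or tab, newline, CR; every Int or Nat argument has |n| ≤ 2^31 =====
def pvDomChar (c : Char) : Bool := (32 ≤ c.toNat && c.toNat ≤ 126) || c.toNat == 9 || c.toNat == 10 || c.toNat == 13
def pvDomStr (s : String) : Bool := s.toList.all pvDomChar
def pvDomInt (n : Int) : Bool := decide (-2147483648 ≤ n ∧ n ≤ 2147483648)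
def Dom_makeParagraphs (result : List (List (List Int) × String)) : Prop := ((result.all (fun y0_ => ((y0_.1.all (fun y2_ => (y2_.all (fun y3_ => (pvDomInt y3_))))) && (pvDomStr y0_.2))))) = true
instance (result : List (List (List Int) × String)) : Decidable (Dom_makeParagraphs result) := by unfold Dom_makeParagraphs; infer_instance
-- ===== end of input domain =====

-- B regroups the work: instead of A's single online fold that keeps rewriting the last entry of two
-- parallel lists, B peels maximal runs of vertically-close boxes off the front and folds each run once
-- into a finished (coordinates, text) paragraph (objective: alternative decomposition, not speed).

-- ===== PORT A =====
-- helper of A, transliterated: indexing coordinates_x[i][j] is pyGetD (pyGetD x i []) j 0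
def makeParagraphsCoordinates (a b : List (List Int)) : List (List Int) :=
  [[min (PySem.List.pyGetD (PySem.List.pyGetD a 0 []) 0 0) (PySem.List.pyGetD (PySem.List.pyGetD b 0 []) 0 0),
      PySem.List.pyGetD (PySem.List.pyGetD a 0 []) 1 0],
   [max (PySem.List.pyGetD (PySem.List.pyGetD a 1 []) 0 0) (PySem.List.pyGetD (PySem.List.pyGetD b 1 []) 0 0),
      PySem.List.pyGetD (PySem.List.pyGetD a 1 []) 1 0],
   [max (PySem.List.pyGetD (PySem.List.pyGetD a 2 []) 0 0) (PySem.List.pyGetD (PySem.List.pyGetD b 2 []) 0 0),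
      PySem.List.pyGetD (PySem.List.pyGetD b 2 []) 1 0],
   [min (PySem.List.pyGetD (PySem.List.pyGetD a 3 []) 0 0) (PySem.List.pyGetD (PySem.List.pyGetD b 3 []) 0 0),
      PySem.List.pyGetD (PySem.List.pyGetD b 3 []) 1 0]]

-- the body of A's for-loop over the state (coordinates, lines); cur = result[i]
def pvStepA (st : List (List (List Int)) × List String) (cur : List (List Int) × String) :
    List (List (List Int)) × List String :=
  if PySem.List.pyGetD (PySem.List.pyGetD cur.1 0 []) 1 0
      - PySem.List.pyGetD (PySem.List.pyGetD (PySem.List.pyGetD st.1 (-1) []) 2 []) 1 0 < 5 then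
    (PySem.List.pySetD st.1 (-1)
        (makeParagraphsCoordinates (PySem.List.pyGetD st.1 (-1) []) cur.1),
     PySem.List.pySetD st.2 (-1) (PySem.List.pyGetD st.2 (-1) "" ++ " " ++ cur.2))
  else
    (st.1 ++ [cur.1], st.2 ++ [cur.2])

def makeParagraphs (result : List (List (List Int) × String)) : List (List (List Int) × String) :=
  let lines : List String := [(PySem.List.pyGetD result 0 ([], "")).2]
  let coordinates : List (List (List Int)) := [(PySem.List.pyGetD result 0 ([], "")).1]
  let st := (PySem.List.pyRange 1 (result.length : Int) 1).foldl
      (fun st i => pvStepA st (PySem.List.pyGetD result i ([], ""))) (coordinates, lines)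
  st.1.zip st.2

-- ===== PORT B =====
def pvMergeBoxes (a b : List (List Int)) : List (List Int) :=
  [[min (PySem.List.pyGetD (PySem.List.pyGetD a 0 []) 0 0) (PySem.List.pyGetD (PySem.List.pyGetD b 0 []) 0 0),
      PySem.List.pyGetD (PySem.List.pyGetD a 0 []) 1 0],
   [max (PySem.List.pyGetD (PySem.List.pyGetD a 1 []) 0 0) (PySem.List.pyGetD (PySem.List.pyGetD b 1 []) 0 0),
      PySem.List.pyGetD (PySem.List.pyGetD a 1 []) 1 0],
   [max (PySem.List.pyGetD (PySem.List.pyGetD a 2 []) 0 0) (PySem.List.pyGetD (PySem.List.pyGetD b 2 []) 0 0),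
      PySem.List.pyGetD (PySem.List.pyGetD b 2 []) 1 0],
   [min (PySem.List.pyGetD (PySem.List.pyGetD a 3 []) 0 0) (PySem.List.pyGetD (PySem.List.pyGetD b 3 []) 0 0),
      PySem.List.pyGetD (PySem.List.pyGetD b 3 []) 1 0]]

-- _splitRun: the while loop becomes structural recursion on rest with the accumulator run
def pvSplitRun (prev : List (List Int) × String) (run rest : List (List (List Int) × String)) :
    List (List (List Int) × String) × List (List (List Int) × String) :=
  match rest with
  | [] => (run, [])
  | c :: cs =>
    if PySem.List.pyGetD (PySem.List.pyGetD c.1 0 []) 1 0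
        - PySem.List.pyGetD (PySem.List.pyGetD prev.1 2 []) 1 0 < 5 then
      pvSplitRun c (run ++ [c]) cs
    else (run, c :: cs)

-- termination fact for the outer while loop: _splitRun's remainder never grows
theorem pvSplitRun_snd_le (rest : List (List (List Int) × String))
    (prev : List (List Int) × String) (run : List (List (List Int) × String)) :
    (pvSplitRun prev run rest).2.length ≤ rest.length := by
  induction rest generalizing prev run with
  | nil => simp [pvSplitRun]
  | cons c cs ih =>
    simp only [pvSplitRun]
    split
    · exact Nat.le_trans (ih c (run ++ [c])) (Nat.le_succ _)
    · exact Nat.le_refl _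

-- the outer while loop of B's makeParagraphs: peel one run, emit one paragraph
def pvParagraphLoop (out boxes : List (List (List Int) × String)) :
    List (List (List Int) × String) :=
  match boxes with
  | [] => out
  | first :: rest =>
    pvParagraphLoop
      (out ++ [(pvSplitRun first [] rest).1.foldl
          (fun ct b => (pvMergeBoxes ct.1 b.1, ct.2 ++ " " ++ b.2)) (first.1, first.2)])
      (pvSplitRun first [] rest).2
termination_by boxes.length
decreasing_by
  exact Nat.lt_succ_of_le (pvSplitRun_snd_le rest first [])

def makeParagraphs_alt (result : List (List (List Int) × String)) :
    List (List (List Int) × String) :=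
  pvParagraphLoop [] result

-- ===== PRECONDITION & SPEC =====
-- Pre_ = nonempty, and (unless the list is a singleton, which A returns unchanged without looking
-- inside the boxes) every box is a well-formed quadrilateral (≥ 4 corner points, corners 0..3 each
-- with ≥ 2 coordinates): A indexes corners 0..3 and coordinate 1 directly and raises IndexError on
-- most ragged multi-box inputs; the ragged shapes that happen to escape its indexing (e.g. far-apart
-- 3-point boxes, which are never merged) are excluded too, and both programs agree there as well.
def Pre_makeParagraphs (result : List (List (List Int) × String)) : Prop :=
  result ≠ [] ∧ (result.length = 1 ∨
    ∀ b ∈ result, 4 ≤ b.1.length ∧ ∀ p ∈ b.1.take 4, 2 ≤ p.length)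
instance (result : List (List (List Int) × String)) : Decidable (Pre_makeParagraphs result) := by
  unfold Pre_makeParagraphs; infer_instance

def pvWitness_makeParagraphs : (List (List (List Int) × String)) :=
  [([[0, 0], [4, 0], [4, 2], [0, 2]], "hi"), ([[0, 3], [4, 3], [4, 5], [0, 5]], "there")]

-- On the empty list A raises IndexError (it indexes result[0]); B naturally returns the empty list.
def Raises_makeParagraphs (result : List (List (List Int) × String)) : Prop := result = []
instance (result : List (List (List Int) × String)) : Decidable (Raises_makeParagraphs result) := by
  unfold Raises_makeParagraphs; infer_instance
def pvRaiseWitness_makeParagraphs : (List (List (List Int) × String)) := []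
def pvRaiseWitnessOut_makeParagraphs : List (List (List Int) × String) := []

def Spec_makeParagraphs (result : List (List (List Int) × String))
    (out : List (List (List Int) × String)) : Prop := out = makeParagraphs_alt result
instance (result : List (List (List Int) × String)) (out : List (List (List Int) × String)) :
    Decidable (Spec_makeParagraphs result out) := by unfold Spec_makeParagraphs; infer_instance

-- ===== CLAIM (what is proved, stated in full; the proofs are below) =====
def Claim_equal_makeParagraphs : Prop := ∀ (result : List (List (List Int) × String)),
  Dom_makeParagraphs result → Pre_makeParagraphs result →
  Spec_makeParagraphs result (makeParagraphs result)

def Claim_raises_makeParagraphs : Prop :=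
  (∀ (result : List (List (List Int) × String)), Dom_makeParagraphs result →
    Raises_makeParagraphs result → ¬ Pre_makeParagraphs result) ∧
  (Dom_makeParagraphs (pvRaiseWitness_makeParagraphs) ∧
    Raises_makeParagraphs (pvRaiseWitness_makeParagraphs) ∧
    makeParagraphs_alt (pvRaiseWitness_makeParagraphs) = pvRaiseWitnessOut_makeParagraphs)

-- ===== LEMMAS AND PROOFS =====

-- the two merge helpers are the same text
theorem pvMergeBoxes_eq : pvMergeBoxes = makeParagraphsCoordinates := rfl

-- KEY FACT: merging keeps the newest box's bottom-right y (coordinate [2][1]), so A's proximity test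
-- against the accumulated box equals B's test against the previous original box.
theorem pvY_merge (a b : List (List Int)) :
    PySem.List.pyGetD (PySem.List.pyGetD (makeParagraphsCoordinates a b) 2 []) 1 0 =
    PySem.List.pyGetD (PySem.List.pyGetD b 2 []) 1 0 := rfl

theorem pvSetD_last {α : Type} (zs : List α) (z v : α) :
    PySem.List.pySetD (zs ++ [z]) (-1) v = zs ++ [v] := by
  have h : PySem.List.pyIdx? (zs.length + 1) (-1) = some zs.length := by
    simp [PySem.List.pyIdx?]
  simp [PySem.List.pySetD, PySem.List.pySet?, h, List.set_append]

-- pvSplitRun's accumulator is only ever appended to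
theorem pvSplitRun_acc (rest : List (List (List Int) × String))
    (prev : List (List Int) × String) (run : List (List (List Int) × String)) :
    pvSplitRun prev run rest =
      (run ++ (pvSplitRun prev [] rest).1, (pvSplitRun prev [] rest).2) := by
  induction rest generalizing prev run with
  | nil => simp [pvSplitRun]
  | cons c cs ih =>
    simp only [pvSplitRun]
    split
    · rw [ih c (run ++ [c]), ih c ([] ++ [c])]
      simp
    · simp

-- finished paragraphs only accumulate at the front of the loop's output
theorem pvParagraphLoop_out (boxes out : List (List (List Int) × String)) :
    pvParagraphLoop out boxes = out ++ pvParagraphLoop [] boxes := by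
  match boxes with
  | [] => simp [pvParagraphLoop]
  | first :: rest =>
    rw [pvParagraphLoop, pvParagraphLoop]
    rw [pvParagraphLoop_out (pvSplitRun first [] rest).2,
        pvParagraphLoop_out (pvSplitRun first [] rest).2 ([] ++ _)]
    simp
termination_by boxes.length
decreasing_by
  · exact Nat.lt_succ_of_le (pvSplitRun_snd_le rest first [])
  · exact Nat.lt_succ_of_le (pvSplitRun_snd_le rest first [])

-- MASTER INVARIANT: A's fold, started on finished paragraphs (cs, ls) plus an open paragraph (c, l)
-- whose test coordinate agrees with the last original box p, produces the finished paragraphs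
-- followed by B's run-peeling result.
theorem pvMaster (xs : List (List (List Int) × String)) (cs : List (List (List Int)))
    (ls : List String) (c : List (List Int)) (l : String) (p : List (List Int) × String)
    (hlen : cs.length = ls.length)
    (hy : PySem.List.pyGetD (PySem.List.pyGetD c 2 []) 1 0 =
          PySem.List.pyGetD (PySem.List.pyGetD p.1 2 []) 1 0) :
    ((xs.foldl pvStepA (cs ++ [c], ls ++ [l])).1.zip
      (xs.foldl pvStepA (cs ++ [c], ls ++ [l])).2) =
    cs.zip ls ++
      ((pvSplitRun p [] xs).1.foldl
          (fun ct b => (pvMergeBoxes ct.1 b.1, ct.2 ++ " " ++ b.2)) (c, l)) ::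
        pvParagraphLoop [] (pvSplitRun p [] xs).2 := by
  induction xs generalizing cs ls c l p with
  | nil =>
    simp [pvSplitRun, pvParagraphLoop, List.zip_append hlen]
  | cons x xs ih =>
    have hlast : PySem.List.pyGetD (cs ++ [c]) (-1) [] = c :=
      PySem.List.pyGetD_neg_one_append_singleton cs c []
    have hlastl : PySem.List.pyGetD (ls ++ [l]) (-1) "" = l :=
      PySem.List.pyGetD_neg_one_append_singleton ls l ""
    simp only [List.foldl_cons]
    by_cases ht : PySem.List.pyGetD (PySem.List.pyGetD x.1 0 []) 1 0
        - PySem.List.pyGetD (PySem.List.pyGetD p.1 2 []) 1 0 < 5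
    · have hstep : pvStepA (cs ++ [c], ls ++ [l]) x =
          (cs ++ [makeParagraphsCoordinates c x.1], ls ++ [l ++ " " ++ x.2]) := by
        simp only [pvStepA, hlast, hlastl]
        rw [if_pos (by rw [hy]; exact ht)]
        rw [pvSetD_last, pvSetD_last]
      rw [hstep, ih cs ls _ _ x hlen (pvY_merge c x.1)]
      have hsplit : pvSplitRun p [] (x :: xs) =
          (x :: (pvSplitRun x [] xs).1, (pvSplitRun x [] xs).2) := by
        rw [pvSplitRun, if_pos ht, pvSplitRun_acc]
        simp
      rw [hsplit]
      simp [pvMergeBoxes_eq]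
    · have hstep : pvStepA (cs ++ [c], ls ++ [l]) x =
          ((cs ++ [c]) ++ [x.1], (ls ++ [l]) ++ [x.2]) := by
        simp only [pvStepA, hlast]
        rw [if_neg (by rw [hy]; exact ht)]
      rw [hstep, ih (cs ++ [c]) (ls ++ [l]) x.1 x.2 x (by simp [hlen]) rfl]
      have hsplit : pvSplitRun p [] (x :: xs) = ([], x :: xs) := by
        rw [pvSplitRun, if_neg ht]
      rw [hsplit]
      have hloop : pvParagraphLoop [] (x :: xs) =
          ((pvSplitRun x [] xs).1.foldl
              (fun ct b => (pvMergeBoxes ct.1 b.1, ct.2 ++ " " ++ b.2)) (x.1, x.2)) ::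
            pvParagraphLoop [] (pvSplitRun x [] xs).2 := by
        rw [pvParagraphLoop, pvParagraphLoop_out]
        simp
      rw [hloop, List.zip_append hlen]
      simp

-- ===== VERDICT (by name: the statement is the Claim_ definition above) =====
theorem makeParagraphs_spec : Claim_equal_makeParagraphs := by
  unfold Claim_equal_makeParagraphs
  intro result _hdom hpre
  unfold Spec_makeParagraphs
  obtain ⟨hne, -⟩ := hpre
  obtain ⟨r0, rest, rfl⟩ : ∃ r0 rest, result = r0 :: rest :=
    match result, hne with
    | r :: rs, _ => ⟨r, rs, rfl⟩
  unfold makeParagraphs makeParagraphs_alt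
  dsimp only
  rw [PySem.List.foldl_pyRange_pyGetD' (r0 :: rest) (([], "")) pvStepA _ (by norm_num)]
  rw [PySem.List.pyGetD_zero_cons r0 rest (([], ""))]
  have hm := pvMaster rest [] [] r0.1 r0.2 r0 rfl rfl
  simp only [List.nil_append] at hm
  rw [show (r0 :: rest).drop (1 : Int).toNat = rest from rfl]
  rw [hm]
  rw [pvParagraphLoop]
  conv_rhs => rw [pvParagraphLoop_out]
  simp

@[simp] theorem makeParagraphs_raises : Claim_raises_makeParagraphs := by
  unfold Claim_raises_makeParagraphs
  refine ⟨fun result _ hr hp => hp.1 hr, by decide, by decide, ?_⟩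
  unfold makeParagraphs_alt pvRaiseWitness_makeParagraphs pvRaiseWitnessOut_makeParagraphs
  rw [pvParagraphLoop]
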